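-- pv_equiv track=rewrite | github.com/phnazari/quark | data/datasets/data_prep_utils.py | _get_docs_boundaries
-- ===== SOURCE A (Python) =====
-- from typing import Any, Dict, List
--
-- def _get_docs_boundaries(
--     doc_lengths: List[int], n_chunks: int, max_seq_length: int
-- ) -> List[List[int]]:
--     """Get the boundaries of documents in concatenated chunks.
--
--     A list of documents has been concatenated and chunked into `n_chunks`
--     of `max_seq_length`. Each original document had a different length,
--     defined in `doc_lengths`.
--
--     Returns a list of lists, where each inner list contains the lengths of
--     document segments present in the corresponding chunk.
--     """
--     doc_boundaries = [[] for _ in range(n_chunks)]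
--
--     doc_idx = 0
--     current_doc_remainder = 0
--
--     for chunk_idx in range(n_chunks):
--         current_chunk_filled_length = 0
--
--         while current_chunk_filled_length < max_seq_length:
--             if current_doc_remainder == 0:
--                 if doc_idx < len(doc_lengths):
--                     current_doc_remainder = doc_lengths[doc_idx]
--                     doc_idx += 1
--                 else:
--                     break
--
--             space_in_chunk = max_seq_length - current_chunk_filled_length
--             amount_to_add = min(current_doc_remainder, space_in_chunk)
--
--             doc_boundaries[chunk_idx].append(amount_to_add)
--             current_chunk_filled_length += amount_to_add
--             current_doc_remainder -= amount_to_add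
--
--     return doc_boundaries
-- ===== SOURCE B (Python) =====
-- from typing import List
--
-- def _get_docs_boundaries(
--     doc_lengths: List[int], n_chunks: int, max_seq_length: int
-- ) -> List[List[int]]:
--     """Doc-major re-implementation: walk the documents once, splitting each
--     across chunk boundaries, instead of filling chunk after chunk."""
--     boundaries: List[List[int]] = [[] for _ in range(n_chunks)]
--     if max_seq_length <= 0:
--         return boundaries
--
--     chunk_idx = 0
--     filled = 0
--     for length in doc_lengths:
--         if chunk_idx >= n_chunks:
--             break
--         remaining = length
--         while True:
--             piece = min(remaining, max_seq_length - filled)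
--             boundaries[chunk_idx].append(piece)
--             filled += piece
--             remaining -= piece
--             if filled >= max_seq_length:
--                 chunk_idx += 1
--                 filled = 0
--                 if chunk_idx >= n_chunks:
--                     break
--             if remaining == 0:
--                 break
--     return boundaries
-- ===== Notes on version B (the rewrite author's own statement) =====
-- stated objective: alternative
-- what changed: A fills chunk after chunk (outer loop over chunks, lazily fetching documents inside); B makes a single doc-major pass (outer loop over documents), splitting each document at chunk boundaries while tracking the current chunk index and fill.
import Mathlib
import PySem

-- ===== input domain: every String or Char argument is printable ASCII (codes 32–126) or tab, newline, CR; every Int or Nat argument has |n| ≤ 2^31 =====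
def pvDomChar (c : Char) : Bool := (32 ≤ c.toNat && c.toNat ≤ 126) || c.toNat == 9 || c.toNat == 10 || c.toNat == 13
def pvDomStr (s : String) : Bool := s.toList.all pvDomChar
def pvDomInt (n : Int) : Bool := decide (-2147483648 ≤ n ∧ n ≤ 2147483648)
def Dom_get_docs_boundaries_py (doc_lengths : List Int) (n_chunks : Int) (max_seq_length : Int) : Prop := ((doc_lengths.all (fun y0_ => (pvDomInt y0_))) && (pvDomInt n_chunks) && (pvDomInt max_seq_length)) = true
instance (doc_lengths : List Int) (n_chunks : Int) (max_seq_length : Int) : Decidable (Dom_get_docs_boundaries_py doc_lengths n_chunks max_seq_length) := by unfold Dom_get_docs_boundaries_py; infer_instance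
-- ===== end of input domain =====

-- B replaces A's chunk-major loop (outer loop over chunks, lazily fetching documents)
-- by a doc-major single pass (outer loop over documents, splitting each document at
-- chunk boundaries); objective: alternative decomposition, same cost.

-- ===== PORT A =====
-- A's inner `while current_chunk_filled_length < max_seq_length` loop for one chunk.
-- Python's `doc_idx` cursor into `doc_lengths` is represented by the suffix `docs` of
-- not-yet-fetched documents (`doc_idx < len(doc_lengths)` = `docs ≠ []`;
-- `doc_lengths[doc_idx]; doc_idx += 1` = taking the head).  Returns the chunk's piece
-- list (`acc` plus the appends) and the surviving loop state (docs, current_doc_remainder).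
def pvAinner (msl : Int) (docs : List Int) (rem filled : Int) (acc : List Int) :
    List Int × List Int × Int :=
  if filled < msl then
    if rem = 0 then
      match docs with
      | [] => (acc, docs, rem)                           -- break: documents exhausted
      | L :: rest =>                                     -- fetch, then fall through to the append
        let a := min L (msl - filled)
        pvAinner msl rest (L - a) (filled + a) (acc ++ [a])
    else
      let a := min rem (msl - filled)
      pvAinner msl docs (rem - a) (filled + a) (acc ++ [a])
  else (acc, docs, rem)
termination_by 3 * docs.length + (if rem = 0 then 1 else 2) + (if filled < msl then 1 else 0)
decreasing_by
  · simp only [List.length_cons]; split_ifs <;> omega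
  · split_ifs <;> omega

-- A's outer `for chunk_idx in range(n_chunks)` loop: the chunks are filled in order.
def pvAouter (msl : Int) (docs : List Int) (rem : Int) : Nat → List (List Int)
  | 0 => []
  | c + 1 =>
    let r := pvAinner msl docs rem 0 []
    r.1 :: pvAouter msl r.2.1 r.2.2 c

def get_docs_boundaries_py (doc_lengths : List Int) (n_chunks : Int) (max_seq_length : Int) :
    List (List Int) :=
  pvAouter max_seq_length doc_lengths 0 n_chunks.toNat

-- ===== PORT B =====
-- B's inner `while True` loop: split the current document (remainder `rem`) at chunk
-- boundaries.  `done` = fully closed chunks, `cur` = pieces of the chunk being filled,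
-- `cr` = number of chunks still open (current one included), `filled` = fill of the
-- current chunk.  Returns the updated (done, cur, cr, filled).
def pvBinner (msl : Int) (done : List (List Int)) (cur : List Int) (cr : Nat)
    (filled rem : Int) : List (List Int) × List Int × Nat × Int :=
  let a := min rem (msl - filled)
  let cur' := cur ++ [a]
  let filled' := filled + a
  let rem' := rem - a
  if msl ≤ filled' then                                  -- chunk boundary reached: close it
    if cr ≤ 1 then (done ++ [cur'], [], 0, 0)            -- capacity reached: break
    else if rem' = 0 then (done ++ [cur'], [], cr - 1, 0)
    else pvBinner msl (done ++ [cur']) [] (cr - 1) 0 rem'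
  else (done, cur', cr, filled')                         -- document exhausted (rem' = 0): break
termination_by cr
decreasing_by omega

-- pads the chunks the documents never reached with [].
def pvBfinish (done : List (List Int)) (cur : List Int) (cr : Nat) : List (List Int) :=
  if cr = 0 then done else done ++ cur :: List.replicate (cr - 1) []

-- B's outer `for length in doc_lengths` loop.
def pvBouter (msl : Int) (docs : List Int) (done : List (List Int)) (cur : List Int)
    (cr : Nat) (filled : Int) : List (List Int) :=
  match docs with
  | [] => pvBfinish done cur cr
  | L :: rest =>
    if cr = 0 then pvBfinish done cur cr                 -- capacity reached: break
    else
      let s := pvBinner msl done cur cr filled L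
      pvBouter msl rest s.1 s.2.1 s.2.2.1 s.2.2.2

def get_docs_boundaries_py_alt (doc_lengths : List Int) (n_chunks : Int) (max_seq_length : Int) :
    List (List Int) :=
  if max_seq_length ≤ 0 then List.replicate n_chunks.toNat []
  else pvBouter max_seq_length doc_lengths [] [] n_chunks.toNat 0

-- ===== PRECONDITION & SPEC =====
def Spec_get_docs_boundaries_py (doc_lengths : List Int) (n_chunks : Int) (max_seq_length : Int) (out : List (List Int)) : Prop := out = get_docs_boundaries_py_alt doc_lengths n_chunks max_seq_length
instance (doc_lengths : List Int) (n_chunks : Int) (max_seq_length : Int) (out : List (List Int)) : Decidable (Spec_get_docs_boundaries_py doc_lengths n_chunks max_seq_length out) := by unfold Spec_get_docs_boundaries_py; infer_instance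

-- ===== CLAIM (what is proved, stated in full; the proofs are below) =====
def Claim_equal_get_docs_boundaries_py : Prop := ∀ (doc_lengths : List Int) (n_chunks : Int) (max_seq_length : Int), Dom_get_docs_boundaries_py doc_lengths n_chunks max_seq_length → Spec_get_docs_boundaries_py doc_lengths n_chunks max_seq_length (get_docs_boundaries_py doc_lengths n_chunks max_seq_length)

-- ===== LEMMAS AND PROOFS =====

-- Common small-step reference machine.  State: remaining documents `docs`, open chunks
-- `cr`, pending document remainder `orem` (none = the next document must be fetched),
-- current fill `filled`.  Returns the piece lists of the `cr` still-open chunks.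
def pvEnc (r : Int) : Option Int := if r = 0 then none else some r

def pvConsHead (a : Int) : List (List Int) → List (List Int)
  | [] => [[a]]
  | h :: t => (a :: h) :: t

def pvG (msl : Int) (docs : List Int) (cr : Nat) (orem : Option Int) (filled : Int) :
    List (List Int) :=
  if cr = 0 then []
  else if msl ≤ filled then [] :: pvG msl docs (cr - 1) orem 0   -- close the current chunk
  else
    match orem with
    | none =>
      match docs with
      | [] => List.replicate cr []                               -- documents exhausted
      | L :: rest => pvG msl rest cr (some L) filled             -- fetch the next document
    | some r =>                                                  -- emit one piece
      let a := min r (msl - filled)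
      pvConsHead a (pvG msl docs cr (pvEnc (r - a)) (filled + a))
termination_by (docs.length, cr, if orem.isSome then 1 else 0, if filled < msl then 1 else 0)
decreasing_by
  all_goals simp only [Prod.lex_def, pvEnc, List.length_cons, Option.isSome]
  all_goals split_ifs <;> simp <;> omega

-- one-step unfolding lemmas for pvG
theorem pvG_zero (msl : Int) (docs : List Int) (orem : Option Int) (filled : Int) :
    pvG msl docs 0 orem filled = [] := by
  rw [pvG.eq_def]; simp

theorem pvG_close (msl : Int) (docs : List Int) (cr : Nat) (orem : Option Int) (filled : Int)
    (h0 : ¬ cr = 0) (h1 : msl ≤ filled) :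
    pvG msl docs cr orem filled = [] :: pvG msl docs (cr - 1) orem 0 := by
  rw [pvG.eq_def]; simp [h0, h1]

theorem pvG_emit (msl : Int) (docs : List Int) (cr : Nat) (r filled : Int)
    (h0 : ¬ cr = 0) (h1 : ¬ msl ≤ filled) :
    pvG msl docs cr (some r) filled =
      pvConsHead (min r (msl - filled))
        (pvG msl docs cr (pvEnc (r - min r (msl - filled))) (filled + min r (msl - filled))) := by
  rw [pvG.eq_def]; simp [h0, h1]

theorem pvG_fetch (msl : Int) (L : Int) (rest : List Int) (cr : Nat) (filled : Int)
    (h0 : ¬ cr = 0) (h1 : ¬ msl ≤ filled) :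
    pvG msl (L :: rest) cr none filled = pvG msl rest cr (some L) filled := by
  rw [pvG.eq_def]; simp [h0, h1]

theorem pvG_fetch_nil (msl : Int) (cr : Nat) (filled : Int)
    (h0 : ¬ cr = 0) (h1 : ¬ msl ≤ filled) :
    pvG msl [] cr none filled = List.replicate cr [] := by
  rw [pvG.eq_def]; simp [h0, h1]

theorem pvG_nil (msl : Int) (cr : Nat) (filled : Int) :
    pvG msl [] cr none filled = List.replicate cr [] := by
  induction cr generalizing filled with
  | zero => simp [pvG_zero]
  | succ c ih =>
    rw [pvG]
    by_cases h : msl ≤ filled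
    · simp [h, ih, List.replicate_succ]
    · simp [h]

theorem pvG_length (msl : Int) (docs : List Int) (cr : Nat) (orem : Option Int) (filled : Int) :
    (pvG msl docs cr orem filled).length = cr := by
  fun_induction pvG with
  | case1 => simp
  | case2 =>
    rename_i cr orem filled h1 h2 ih
    simp [ih]; omega
  | case3 => simp
  | case4 => rename_i ih; exact ih
  | case5 =>
    rename_i docs cr filled h1 h2 r a ih
    rcases h : pvG msl docs cr (pvEnc (r - a)) (filled + a) with _ | ⟨hd, tl⟩
    · rw [h] at ih; simp at ih; omega
    · rw [h] at ih; simp [pvConsHead, ← ih]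

theorem pvG_mle (msl : Int) (hm : msl ≤ 0) (cr : Nat) (docs : List Int) (orem : Option Int) :
    pvG msl docs cr orem 0 = List.replicate cr [] := by
  induction cr with
  | zero => rw [pvG.eq_def]; simp
  | succ c ih => rw [pvG.eq_def]; simp [if_pos hm, ih, List.replicate_succ]

-- pvAinner only appends to its accumulator.
theorem pvAinner_acc (msl : Int) (docs : List Int) (rem filled : Int) (acc pre : List Int) :
    pvAinner msl docs rem filled (pre ++ acc) =
      ((pre ++ (pvAinner msl docs rem filled acc).1, (pvAinner msl docs rem filled acc).2)) := by
  fun_induction pvAinner msl docs rem filled acc generalizing pre with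
  | case1 =>
    rename_i filled acc h
    rw [pvAinner]; simp [h]
  | case2 =>
    rename_i filled acc h L rest a ih
    rw [pvAinner]
    simp only [h, if_true]
    simp only [List.append_assoc]
    exact ih pre
  | case3 =>
    rename_i docs rem filled acc h1 h2 a ih
    rw [pvAinner.eq_def]
    simp only [h1, if_true, if_neg h2]
    simp only [List.append_assoc]
    exact ih pre
  | case4 =>
    rename_i docs rem filled acc h
    rw [pvAinner.eq_def]; simp [h]

-- A's inner loop simulates pvG: the chunk list pvAinner produces is pvG's head, and pvG
-- continues from pvAinner's exit state with the current chunk closed.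
theorem pvAinner_G (msl : Int) (docs : List Int) (rem filled : Int) (acc : List Int) (cr : Nat) :
    pvG msl docs (cr + 1) (pvEnc rem) filled =
      ((pvAinner msl docs rem filled acc).1.drop acc.length) ::
        pvG msl (pvAinner msl docs rem filled acc).2.1 cr
          (pvEnc (pvAinner msl docs rem filled acc).2.2) 0 := by
  fun_induction pvAinner msl docs rem filled acc with
  | case1 =>
    rename_i filled acc h
    rw [show pvEnc (0:Int) = none from rfl, pvG]
    simp [show ¬ msl ≤ filled from by omega, pvG_nil, List.replicate_succ, List.drop_length]
  | case2 =>
    rename_i filled acc h L rest a ih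
    have hacc := pvAinner_acc msl rest (L - a) (filled + a) [] (acc ++ [a])
    simp only [List.append_nil] at hacc
    rw [show pvEnc (0:Int) = none from rfl]
    rw [pvG.eq_def]
    simp only [Nat.succ_ne_zero, if_false, if_neg (show ¬ msl ≤ filled from by omega)]
    rw [pvG.eq_def]
    simp only [Nat.succ_ne_zero, if_false, if_neg (show ¬ msl ≤ filled from by omega)]
    rw [ih, hacc]
    simp [pvConsHead, List.drop_left', List.length_append]
    rfl
  | case3 =>
    rename_i docs rem filled acc h1 h2 a ih
    have hacc := pvAinner_acc msl docs (rem - a) (filled + a) [] (acc ++ [a])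
    simp only [List.append_nil] at hacc
    rw [show pvEnc rem = some rem from by simp [pvEnc, h2]]
    rw [pvG.eq_def]
    simp only [Nat.succ_ne_zero, if_false, if_neg (show ¬ msl ≤ filled from by omega)]
    rw [ih, hacc]
    simp [pvConsHead, List.drop_left', List.length_append]
    rfl
  | case4 =>
    rename_i docs rem filled acc h
    rw [pvG.eq_def]
    simp [show msl ≤ filled from by omega, List.drop_length]

theorem pvAouter_G (msl : Int) (cr : Nat) (docs : List Int) (rem : Int) :
    pvAouter msl docs rem cr = pvG msl docs cr (pvEnc rem) 0 := by
  induction cr generalizing docs rem with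
  | zero => rw [pvAouter, pvG.eq_def]; simp
  | succ c ih =>
    rw [pvAouter]
    rw [pvAinner_G msl docs rem 0 [] c]
    simp [ih]

-- absorb the already-placed pieces of the current chunk into pvG's head
def pvHeadCons (cur : List Int) : List (List Int) → List (List Int)
  | [] => []
  | h :: t => (cur ++ h) :: t

theorem pvHeadCons_nil (l : List (List Int)) : pvHeadCons [] l = l := by
  cases l <;> simp [pvHeadCons]

-- B's inner loop simulates pvG with a pending document remainder `some rem`; it also
-- preserves the invariant "all chunks closed, or the current chunk is not full".
theorem pvBinner_G (msl : Int) (done : List (List Int)) (cur : List Int) (cr : Nat)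
    (filled rem : Int) (hm : 0 < msl) (hcr : 1 ≤ cr) (hf : filled < msl) :
    (∀ docs : List Int,
      (pvBinner msl done cur cr filled rem).1 ++
        pvHeadCons (pvBinner msl done cur cr filled rem).2.1
          (pvG msl docs (pvBinner msl done cur cr filled rem).2.2.1 none
            (pvBinner msl done cur cr filled rem).2.2.2) =
      done ++ pvHeadCons cur (pvG msl docs cr (some rem) filled)) ∧
    ((pvBinner msl done cur cr filled rem).2.2.1 = 0 ∨
      (pvBinner msl done cur cr filled rem).2.2.2 < msl) := by
  fun_induction pvBinner msl done cur cr filled rem with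
  | case1 =>
    rename_i done cur cr filled rem a cur' filled' h1 h2
    have hcr1 : cr = 1 := by omega
    subst hcr1
    refine ⟨fun docs => ?_, Or.inl rfl⟩
    rw [pvG_emit msl docs 1 rem filled (by omega) (by omega),
        pvG_close msl docs 1 _ _ (by omega) h1]
    simp [pvG_zero, pvConsHead, pvHeadCons]
    rfl
  | case2 =>
    rename_i done cur cr filled rem a cur' filled' rem' h1 h2 h3
    refine ⟨fun docs => ?_, Or.inr hm⟩
    rw [pvG_emit msl docs cr rem filled (by omega) (by omega),
        show pvEnc (rem - min rem (msl - filled)) = none from by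
          simp only [pvEnc, if_pos (show rem - min rem (msl - filled) = 0 from h3)],
        pvG_close msl docs cr _ _ (by omega) h1]
    simp [pvConsHead, pvHeadCons]
    exact ⟨rfl, by cases pvG msl docs (cr - 1) none 0 <;> rfl⟩
  | case3 =>
    rename_i done cur cr filled rem a cur' filled' rem' h1 h2 h3 ih
    obtain ⟨ihf, ihinv⟩ := ih (by omega) hm
    refine ⟨fun docs => ?_, ihinv⟩
    rw [ihf docs,
        pvG_emit msl docs cr rem filled (by omega) (by omega),
        show pvEnc (rem - min rem (msl - filled)) = some (rem - min rem (msl - filled)) from by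
          simp only [pvEnc, if_neg (show ¬ rem - min rem (msl - filled) = 0 from h3)],
        pvG_close msl docs cr _ _ (by omega) h1]
    simp [pvConsHead, pvHeadCons]
    refine ⟨rfl, ?_⟩
    have he : pvG msl docs (cr - 1) (some rem') 0 =
        pvG msl docs (cr - 1) (some (rem - min rem (msl - filled))) 0 := rfl
    rw [← he]
    cases pvG msl docs (cr - 1) (some rem') 0 <;> rfl
  | case4 =>
    rename_i done cur cr filled rem a cur' filled' h1
    refine ⟨fun docs => ?_, Or.inr (show filled + min rem (msl - filled) < msl by omega)⟩
    rw [pvG_emit msl docs cr rem filled (by omega) (by omega),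
        show pvEnc (rem - min rem (msl - filled)) = none from by
          simp only [pvEnc, if_pos (show rem - min rem (msl - filled) = 0 from by omega)]]
    rcases hg : pvG msl docs cr none (filled + min rem (msl - filled)) with _ | ⟨hd, tl⟩
    · have := pvG_length msl docs cr none (filled + min rem (msl - filled))
      rw [hg] at this; simp at this; omega
    · simp only [pvConsHead, pvHeadCons]
      show done ++ ((cur ++ [min rem (msl - filled)]) ++ hd) :: tl =
        done ++ (cur ++ min rem (msl - filled) :: hd) :: tl
      simp

theorem pvBouter_G (msl : Int) (docs : List Int) (done : List (List Int)) (cur : List Int)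
    (cr : Nat) (filled : Int) (hm : 0 < msl) (hinv : cr = 0 ∨ filled < msl) :
    pvBouter msl docs done cur cr filled = done ++ pvHeadCons cur (pvG msl docs cr none filled) := by
  induction docs generalizing done cur cr filled with
  | nil =>
    rw [pvBouter]
    rcases Nat.eq_zero_or_pos cr with h0 | hpos
    · subst h0; simp [pvBfinish, pvG_zero, pvHeadCons]
    · have hf : filled < msl := by rcases hinv with h | h; omega; exact h
      rw [pvG_fetch_nil msl cr filled (by omega) (by omega)]
      rcases cr with _ | c
      · omega
      · simp [pvBfinish, List.replicate_succ, pvHeadCons]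
  | cons L rest ih =>
    rw [pvBouter]
    rcases Nat.eq_zero_or_pos cr with h0 | hpos
    · subst h0; simp [pvBfinish, pvG_zero, pvHeadCons]
    · simp only [if_neg (by omega : ¬ cr = 0)]
      have hf : filled < msl := by rcases hinv with h | h; omega; exact h
      have hb := pvBinner_G msl done cur cr filled L hm (by omega) hf
      rw [ih _ _ _ _ hb.2]
      rw [hb.1 rest]
      rw [pvG_fetch msl L rest cr filled (by omega) (by omega)]

-- ===== VERDICT (by name: the statement is the Claim_ definition above) =====
theorem get_docs_boundaries_py_spec : Claim_equal_get_docs_boundaries_py := by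
  intro dl n msl _
  unfold Spec_get_docs_boundaries_py get_docs_boundaries_py get_docs_boundaries_py_alt
  rw [pvAouter_G]
  by_cases hm : msl ≤ 0
  · rw [if_pos hm]
    rw [show pvEnc 0 = none from rfl]
    exact pvG_mle msl hm n.toNat dl none
  · rw [if_neg hm]
    rw [pvBouter_G msl dl [] [] n.toNat 0 (by omega) (Or.inr (by omega))]
    rw [show pvEnc 0 = none from rfl]
    simp [pvHeadCons_nil]
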